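-- pv_equiv track=rewrite | github.com/EtoiledeScauchy/Cartesian-Frames | tools.py | functions_between
-- ===== SOURCE A (Python) =====
-- from copy import deepcopy
--
-- def functions_between(domain : set, codomain : set):
--     if not codomain and domain: return [] # no function
--     if not domain: return [dict()] # others empty cases -> only empty function
--     functions_tree = [[dict()]]
--     for x in domain:
--         functions_tree += [[]]
--         for f in functions_tree[-2]:
--             for y in codomain:
--                 f2 = deepcopy(f)
--                 f2[x] = y
--                 functions_tree[-1] += [f2]
--     return functions_tree[-1]
-- ===== SOURCE B (Python) =====
-- from itertools import product
--
-- def functions_between(domain : set, codomain : set):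
--     keys = list(domain)
--     return [dict(zip(keys, combo)) for combo in product(codomain, repeat=len(keys))]
-- ===== Notes on version B (the rewrite author's own statement) =====
-- stated objective: idiomatic
-- what changed: Replaces the layered functions_tree built by three nested loops with deepcopy per step by a single comprehension over itertools.product(codomain, repeat=len(domain)) zipped with the key list.
import Mathlib
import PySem

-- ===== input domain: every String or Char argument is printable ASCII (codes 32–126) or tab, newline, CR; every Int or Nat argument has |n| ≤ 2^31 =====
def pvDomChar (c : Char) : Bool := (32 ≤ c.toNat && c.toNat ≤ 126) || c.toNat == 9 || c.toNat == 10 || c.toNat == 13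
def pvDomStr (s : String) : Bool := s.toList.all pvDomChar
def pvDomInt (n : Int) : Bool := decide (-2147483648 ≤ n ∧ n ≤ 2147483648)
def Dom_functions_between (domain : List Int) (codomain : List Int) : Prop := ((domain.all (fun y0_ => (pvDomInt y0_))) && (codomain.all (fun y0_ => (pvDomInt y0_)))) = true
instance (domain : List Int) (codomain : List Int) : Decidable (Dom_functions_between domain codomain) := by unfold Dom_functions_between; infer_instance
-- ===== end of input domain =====

-- B replaces A's layered functions_tree (nested loops + deepcopy) by an idiomatic product-of-codomain comprehension; same cost, same output order.



-- ===== PORT A =====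
-- dict assignment f[k] = v on an insertion-ordered assoc list (overwrite in place, new keys append)
def dinsert : List (Int × Int) → Int → Int → List (Int × Int)
  | [], k, v => [(k, v)]
  | (a, b) :: t, k, v => if a = k then (k, v) :: t else (a, b) :: dinsert t k v

-- literal port of A: the layered functions_tree; the inner two loops build tree[-1] before it is appended
def functions_between (domain : List Int) (codomain : List Int) : List (List (Int × Int)) :=
  if codomain = [] ∧ domain ≠ [] then []
  else if domain = [] then [[]]
  else
    (domain.foldl
      (fun tree x =>
        tree ++ [(tree.getLastD []).foldl
          (fun layer f => codomain.foldl (fun layer y => layer ++ [dinsert f x y]) layer) []])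
      [[[]]]).getLastD []

-- ===== PORT B =====
-- itertools.product(codomain, repeat=n): last position varies fastest
def prodRepeat (codomain : List Int) : Nat → List (List Int)
  | 0 => [[]]
  | n + 1 => (prodRepeat codomain n).flatMap (fun t => codomain.map (fun y => t ++ [y]))

-- dict(pairs): successive insertion
def dictOf (pairs : List (Int × Int)) : List (Int × Int) :=
  pairs.foldl (fun d kv => dinsert d kv.1 kv.2) []

def functions_between_alt (domain : List Int) (codomain : List Int) : List (List (Int × Int)) :=
  (prodRepeat codomain domain.length).map (fun combo => dictOf (domain.zip combo))

-- ===== PRECONDITION & SPEC =====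
def Spec_functions_between (domain : List Int) (codomain : List Int) (out : List (List (Int × Int))) : Prop := out = functions_between_alt domain codomain
instance (domain : List Int) (codomain : List Int) (out : List (List (Int × Int))) : Decidable (Spec_functions_between domain codomain out) := by unfold Spec_functions_between; infer_instance

-- ===== CLAIM (what is proved, stated in full; the proofs are below) =====
def Claim_equal_functions_between : Prop := ∀ (domain : List Int) (codomain : List Int), Dom_functions_between domain codomain → Spec_functions_between domain codomain (functions_between domain codomain)


-- ===== LEMMAS AND PROOFS =====

-- inner loop of A: appending one dict per codomain element
lemma inner_fold (c : List Int) (f : List (Int × Int)) (x : Int) (acc : List (List (Int × Int))) :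
    c.foldl (fun layer y => layer ++ [dinsert f x y]) acc = acc ++ c.map (fun y => dinsert f x y) := by
  induction c generalizing acc with
  | nil => simp
  | cons y ys ih => simp [List.foldl_cons, ih]

-- middle loop of A: one layer step is a flatMap
lemma layer_fold (c : List Int) (x : Int) (layer : List (List (Int × Int)))
    (init : List (List (Int × Int))) :
    layer.foldl (fun acc f => c.foldl (fun acc y => acc ++ [dinsert f x y]) acc) init
      = init ++ layer.flatMap (fun f => c.map (fun y => dinsert f x y)) := by
  induction layer generalizing init with
  | nil => simp
  | cons f fs ih =>
    rw [List.foldl_cons, inner_fold, ih, List.append_assoc, List.flatMap_cons]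

lemma length_prodRepeat (c : List Int) (n : Nat) : ∀ t ∈ prodRepeat c n, t.length = n := by
  induction n with
  | zero => simp [prodRepeat]
  | succ n ih =>
    intro t ht
    simp only [prodRepeat, List.mem_flatMap, List.mem_map] at ht
    obtain ⟨s, hs, y, _, rfl⟩ := ht
    simp [ih s hs]

lemma dictOf_concat (p : List (Int × Int)) (x y : Int) :
    dictOf (p ++ [(x, y)]) = dinsert (dictOf p) x y := by
  simp [dictOf, List.foldl_append]

-- main invariant: the last layer of A's tree after processing ds is B's list
lemma lastLayer_eq (c : List Int) (ds : List Int) :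
    ((ds.foldl
        (fun tree x =>
          tree ++ [(tree.getLastD []).foldl
            (fun layer f => c.foldl (fun layer y => layer ++ [dinsert f x y]) layer) []])
        [[[]]]).getLastD [])
      = (prodRepeat c ds.length).map (fun t => dictOf (ds.zip t)) := by
  induction ds using List.reverseRecOn with
  | nil => simp [prodRepeat, dictOf]
  | append_singleton ds x ih =>
    rw [List.foldl_append, List.foldl_cons, List.foldl_nil, List.getLastD_concat, layer_fold,
      List.nil_append, ih, List.flatMap_map]
    simp only [List.length_append, List.length_cons, List.length_nil, prodRepeat,
      List.map_flatMap]
    refine List.flatMap_congr (fun t ht => ?_)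
    have hlen : ds.length = t.length := (length_prodRepeat c ds.length t ht).symm
    simp only [List.map_map, Function.comp_def]
    refine List.map_congr_left (fun y _ => ?_)
    rw [List.zip_append hlen, show ([x].zip [y]) = [(x, y)] from rfl, dictOf_concat]

-- ===== VERDICT (by name: the statement is the Claim_ definition above) =====
theorem functions_between_spec : Claim_equal_functions_between := by
  intro domain codomain _
  show functions_between domain codomain = functions_between_alt domain codomain
  unfold functions_between functions_between_alt
  split
  · next h =>
    obtain ⟨rfl, hd⟩ := h
    obtain ⟨d, ds, rfl⟩ := List.exists_cons_of_ne_nil hd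
    have : ∀ n, prodRepeat [] (n + 1) = [] := by intro n; simp [prodRepeat]
    simp [List.length_cons, this]
  · split
    · next h => subst h; simp [prodRepeat, dictOf]
    · exact lastLayer_eq codomain domain
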